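-- pv_equiv track=rewrite | github.com/koeppl/lzw-sensitivity | lzmw_compress.py | lzmw_compress
-- ===== SOURCE A (Python) =====
-- def format_seq(seq_tuple: tuple[int, ...] | None, label_map: dict[int, str]) -> str:
--     """Format a sequence tuple as a concatenation of symbol labels.
--
--     Args:
--         seq_tuple: A tuple of integer symbols, or None.
--         label_map: Mapping from integer symbol to its display label.
--
--     Returns:
--         A string of concatenated labels, or an empty string for None/empty input.
--     """
--     if not seq_tuple:
--         return ""
--     return "".join(label_map[s] for s in seq_tuple)
--
-- def lzmw_compress(
--     symbol_sequence: list[int],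
-- ) -> tuple[list[dict[str, str]], int]:
--     """Run LZMW compression on an integer symbol sequence.
--
--     The dictionary is initialised with all unique input symbols.  At each step
--     the algorithm finds the longest dictionary match f_x, then registers the
--     concatenation f_{x-1}·f_x as a new entry (for x >= 2).
--
--     Args:
--         symbol_sequence: The input sequence of integer symbols.
--
--     Returns:
--         A tuple ``(factors_details, factor_count)`` where ``factors_details``
--         is a list of per-step records for display, and ``factor_count`` is the
--         total number of LZMW factors.
--     """
--     unique_symbols = sorted(set(symbol_sequence))
--     label_map: dict[int, str] = {s: f"sigma_{s}" for s in unique_symbols}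
--
--     # Dictionary keyed by symbol tuples; values are human-readable labels
--     dictionary: dict[tuple[int, ...], str] = {(s,): f"sigma_{s}" for s in unique_symbols}
--
--     factors_details: list[dict[str, str]] = []
--     # Keep the actual tuples of previously output factors for dict updates
--     factors: list[tuple[int, ...]] = []
--
--     seq = tuple(symbol_sequence)
--     n = len(seq)
--     i = 0
--     factor_count = 0
--     dict_add_count = 0
--
--     while i < n:
--         # Find the longest dictionary match at the current position
--         f_seq: tuple[int, ...] = ()
--         f_lbl = ""
--         for d_seq in sorted(dictionary.keys(), key=len, reverse=True):
--             if seq[i : i + len(d_seq)] == d_seq: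
--                 f_seq = d_seq
--                 f_lbl = dictionary[d_seq]
--                 break
--
--         # Fallback: always matches at least the single symbol (guaranteed by init)
--         if not f_seq:
--             f_seq = (seq[i],)
--             f_lbl = label_map[seq[i]]
--
--         factor_count += 1
--         factors.append(f_seq)
--
--         # Register the concatenation of the previous factor and current factor
--         # as a new dictionary entry (only from the second factor onwards)
--         new_entry: tuple[int, ...] | None = None
--         new_id = "-"
--         if factor_count >= 2:
--             combined = factors[factor_count - 2] + factors[factor_count - 1]
--             if combined not in dictionary:
--                 dict_add_count += 1
--                 new_id = f"D_{dict_add_count}"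
--                 dictionary[combined] = new_id
--                 new_entry = combined
--
--         factors_details.append(
--             {
--                 "Step": str(factor_count),
--                 "Factor": format_seq(f_seq, label_map),
--                 "Dict match": f_lbl,
--                 "New entry (F_{x-1}F_x)": format_seq(new_entry, label_map) if new_entry else "-",
--                 "New ID": new_id,
--             }
--         )
--
--         i += len(f_seq)
--
--     return factors_details, factor_count
-- ===== SOURCE B (Python) =====
-- def lzmw_compress(
--     symbol_sequence: list[int],
-- ) -> tuple[list[dict[str, str]], int]:
--     """LZMW compression via longest-match probing on a length-bounded hash set
--     (no per-step sorting of all dictionary keys)."""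
--     seq = tuple(symbol_sequence)
--     n = len(seq)
--
--     # Dictionary keyed by symbol tuples; initialised with every distinct symbol.
--     dictionary: dict[tuple[int, ...], str] = {
--         (s,): f"sigma_{s}" for s in sorted(set(seq))
--     }
--     max_len = 1  # upper bound on the length of any dictionary key
--
--     factors_details: list[dict[str, str]] = []
--     prev: tuple[int, ...] | None = None  # previously output factor
--
--     i = 0
--     factor_count = 0
--     dict_add_count = 0
--
--     while i < n:
--         # Longest dictionary match at i: probe candidate lengths downward.
--         L = min(max_len, n - i)
--         while L > 1 and seq[i : i + L] not in dictionary: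
--             L -= 1
--         cur = seq[i : i + L]
--         lbl = dictionary[cur]  # the length-1 candidate is always present
--
--         factor_count += 1
--
--         new_text = "-"
--         new_id = "-"
--         if prev is not None:
--             combined = prev + cur
--             if combined not in dictionary:
--                 dict_add_count += 1
--                 new_id = f"D_{dict_add_count}"
--                 dictionary[combined] = new_id
--                 new_text = "".join(f"sigma_{s}" for s in combined)
--                 if len(combined) > max_len:
--                     max_len = len(combined)
--
--         factors_details.append(
--             {
--                 "Step": str(factor_count),
--                 "Factor": "".join(f"sigma_{s}" for s in cur),
--                 "Dict match": lbl,
--                 "New entry (F_{x-1}F_x)": new_text,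
--                 "New ID": new_id,
--             }
--         )
--
--         prev = cur
--         i += L
--
--     return factors_details, factor_count
-- ===== Notes on version B (the rewrite author's own statement) =====
-- stated objective: faster
-- what changed: Instead of sorting all dictionary keys by length and scanning them at every step, B keeps a running bound on the maximal key length and probes candidate match lengths downward with O(1) hash-set membership tests, tracking only the previous factor instead of the whole factor list.
import Mathlib
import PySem

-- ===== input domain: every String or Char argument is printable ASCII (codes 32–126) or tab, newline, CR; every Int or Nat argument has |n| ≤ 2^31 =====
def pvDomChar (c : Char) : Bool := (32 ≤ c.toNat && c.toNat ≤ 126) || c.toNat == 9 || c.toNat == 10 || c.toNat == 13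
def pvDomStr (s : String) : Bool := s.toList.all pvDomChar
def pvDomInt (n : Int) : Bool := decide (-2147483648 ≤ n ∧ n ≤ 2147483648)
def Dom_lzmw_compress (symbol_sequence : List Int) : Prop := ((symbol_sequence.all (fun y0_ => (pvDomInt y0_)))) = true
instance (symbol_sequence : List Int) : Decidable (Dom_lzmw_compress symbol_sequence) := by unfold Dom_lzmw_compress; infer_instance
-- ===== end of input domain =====

-- B replaces A's per-step sort-all-keys-and-scan longest-match search by downward
-- length probing against the dictionary with a running maximal-key-length bound
-- (objective: faster).

-- ===== PORT A =====

-- format_seq(seq_tuple, label_map)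
def pvFmtA (labelMap : PySem.Dict Int String) (t : List Int) : String :=
  if t = [] then "" else PySem.Str.join "" (t.map (fun s => labelMap.getD s ""))

-- the `while i < n` loop of A; fuel = len(seq) suffices since i advances by ≥ 1.
-- `getD`/`pyGetD` defaults are totality guards on branches Python cannot reach
-- (matched keys are in the dictionary, i < n, indices fc'-2/fc'-1 are in range).
def pvALoop (seq : List Int) (labelMap : PySem.Dict Int String) :
    Nat → Nat → PySem.Dict (List Int) String → List (List Int) →
    List (List (String × String)) → Int → Int → (List (List (String × String))) × Int
  | 0, _, _, _, details, fc, _ => (details, fc)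
  | fuel+1, i, dict, factors, details, fc, dac =>
    if i < seq.length then
      -- for d_seq in sorted(dictionary.keys(), key=len, reverse=True): … break
      let m := (PySem.List.sorted dict.keys (fun d => d.length) true).find?
                 (fun d => PySem.List.slice seq (some (i:Int)) (some ((i:Int) + (d.length:Int))) == d)
      let f0 : List Int × String :=
        match m with
        | some d => (d, dict.getD d "")
        | none => ([], "")
      -- if not f_seq: fallback to the single symbol
      let f1 : List Int × String :=
        if f0.1 = [] then
          ([PySem.List.pyGetD seq (i:Int) 0], labelMap.getD (PySem.List.pyGetD seq (i:Int) 0) "")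
        else f0
      let fc' := fc + 1
      let factors' := factors ++ [f1.1]
      -- (new_entry, new_id, dictionary, dict_add_count) after the registration step
      let upd : Option (List Int) × String × PySem.Dict (List Int) String × Int :=
        if 2 ≤ fc' then
          let combined := PySem.List.pyGetD factors' (fc' - 2) [] ++ PySem.List.pyGetD factors' (fc' - 1) []
          if dict.contains combined then (none, "-", dict, dac)
          else (some combined, "D_" ++ PySem.Int.toStr (dac + 1),
                dict.insert combined ("D_" ++ PySem.Int.toStr (dac + 1)), dac + 1)
        else (none, "-", dict, dac)
      let row : List (String × String) :=
        [("Step", PySem.Int.toStr fc'),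
         ("Factor", pvFmtA labelMap f1.1),
         ("Dict match", f1.2),
         ("New entry (F_{x-1}F_x)", match upd.1 with | some c => pvFmtA labelMap c | none => "-"),
         ("New ID", upd.2.1)]
      pvALoop seq labelMap fuel (i + f1.1.length) upd.2.2.1 factors' (details ++ [row]) fc' upd.2.2.2
    else (details, fc)

def lzmw_compress (symbol_sequence : List Int) : (List (List (String × String))) × Int :=
  let uniqueSymbols := PySem.List.sorted (PySem.Set.ofList symbol_sequence) (fun x => x) false
  let labelMap : PySem.Dict Int String :=
    uniqueSymbols.foldl (fun d s => d.insert s ("sigma_" ++ PySem.Int.toStr s)) PySem.Dict.empty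
  let dict0 : PySem.Dict (List Int) String :=
    uniqueSymbols.foldl (fun d s => d.insert [s] ("sigma_" ++ PySem.Int.toStr s)) PySem.Dict.empty
  pvALoop symbol_sequence labelMap symbol_sequence.length 0 dict0 [] [] 0 0

-- ===== PORT B =====

def pvFmtB (t : List Int) : String :=
  PySem.Str.join "" (t.map (fun s => "sigma_" ++ PySem.Int.toStr s))

-- while L > 1 and seq[i:i+L] not in dictionary: L -= 1
def pvProbe (seq : List Int) (dict : PySem.Dict (List Int) String) (i : Nat) : Nat → Nat
  | 0 => 0
  | 1 => 1
  | L+2 =>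
    if dict.contains (PySem.List.slice seq (some (i:Int)) (some ((i:Int) + ((L+2 : Nat):Int)))) then L+2
    else pvProbe seq dict i (L+1)

-- the `while i < n` loop of B; same fuel convention as A's port.
def pvBLoop (seq : List Int) :
    Nat → Nat → PySem.Dict (List Int) String → Nat → Option (List Int) →
    List (List (String × String)) → Int → Int → (List (List (String × String))) × Int
  | 0, _, _, _, _, details, fc, _ => (details, fc)
  | fuel+1, i, dict, maxLen, prev, details, fc, dac =>
    if i < seq.length then
      let L := pvProbe seq dict i (min maxLen (seq.length - i))
      let cur := PySem.List.slice seq (some (i:Int)) (some ((i:Int) + (L:Int)))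
      let lbl := dict.getD cur ""  -- dictionary[cur]; the length-1 candidate is always present
      let fc' := fc + 1
      -- (new_text, new_id, dictionary, dict_add_count, max_len)
      let upd : String × String × PySem.Dict (List Int) String × Int × Nat :=
        match prev with
        | none => ("-", "-", dict, dac, maxLen)
        | some pf =>
          let combined := pf ++ cur
          if dict.contains combined then ("-", "-", dict, dac, maxLen)
          else (pvFmtB combined, "D_" ++ PySem.Int.toStr (dac + 1),
                dict.insert combined ("D_" ++ PySem.Int.toStr (dac + 1)), dac + 1,
                max maxLen combined.length)
      let row : List (String × String) :=
        [("Step", PySem.Int.toStr fc'),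
         ("Factor", pvFmtB cur),
         ("Dict match", lbl),
         ("New entry (F_{x-1}F_x)", upd.1),
         ("New ID", upd.2.1)]
      pvBLoop seq fuel (i + L) upd.2.2.1 upd.2.2.2.2 (some cur) (details ++ [row]) fc' upd.2.2.2.1
    else (details, fc)

def lzmw_compress_alt (symbol_sequence : List Int) : (List (List (String × String))) × Int :=
  let dict0 : PySem.Dict (List Int) String :=
    (PySem.List.sorted (PySem.Set.ofList symbol_sequence) (fun x => x) false).foldl
      (fun d s => d.insert [s] ("sigma_" ++ PySem.Int.toStr s)) PySem.Dict.empty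
  pvBLoop symbol_sequence symbol_sequence.length 0 dict0 1 none [] 0 0

-- ===== PRECONDITION & SPEC =====
def Spec_lzmw_compress (symbol_sequence : List Int) (out : (List (List (String × String))) × Int) : Prop := out = lzmw_compress_alt symbol_sequence
instance (symbol_sequence : List Int) (out : (List (List (String × String))) × Int) : Decidable (Spec_lzmw_compress symbol_sequence out) := by unfold Spec_lzmw_compress; infer_instance

-- ===== CLAIM (what is proved, stated in full; the proofs are below) =====
def Claim_equal_lzmw_compress : Prop := ∀ (symbol_sequence : List Int), Dom_lzmw_compress symbol_sequence → Spec_lzmw_compress symbol_sequence (lzmw_compress symbol_sequence)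

-- ===== LEMMAS AND PROOFS =====

theorem pvProbe_spec (seq : List Int) (dict : PySem.Dict (List Int) String) (i : Nat) :
    ∀ L0, 1 ≤ L0 →
      1 ≤ pvProbe seq dict i L0 ∧ pvProbe seq dict i L0 ≤ L0 ∧
      (pvProbe seq dict i L0 = 1 ∨
        dict.contains (PySem.List.slice seq (some (i:Int)) (some ((i:Int) + ((pvProbe seq dict i L0 : Nat):Int)))) = true) ∧
      ∀ L', pvProbe seq dict i L0 < L' → L' ≤ L0 →
        dict.contains (PySem.List.slice seq (some (i:Int)) (some ((i:Int) + ((L':Nat):Int)))) = false := by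
  intro L0
  induction L0 with
  | zero => omega
  | succ m ih =>
    intro _
    match m with
    | 0 =>
      refine ⟨le_refl _, le_refl _, Or.inl rfl, ?_⟩
      intro L' h1 h2
      simp [pvProbe] at h1 h2
      omega
    | Nat.succ k =>
      show 1 ≤ pvProbe seq dict i (k+2) ∧ pvProbe seq dict i (k+2) ≤ k+2 ∧ _ ∧ _
      rw [pvProbe]
      by_cases hc : dict.contains (PySem.List.slice seq (some (i:Int)) (some ((i:Int) + ((k+2 : Nat):Int)))) = true
      · rw [if_pos hc]
        refine ⟨by omega, le_refl _, Or.inr hc, ?_⟩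
        intro L' h1 h2; omega
      · rw [if_neg hc]
        obtain ⟨a1, a2, a3, a4⟩ := ih (by omega)
        refine ⟨a1, le_trans a2 (by omega), a3, ?_⟩
        intro L' h1 h2
        by_cases hL : L' ≤ k + 1
        · exact a4 L' h1 hL
        · have : L' = k + 2 := by omega
          subst this
          simpa using hc

theorem pv_find_first_len (p : List Int → Bool) :
    ∀ (l : List (List Int)), l.Pairwise (fun a b => b.length ≤ a.length) →
      ∀ d ∈ l, p d = true →
        ∃ e, l.find? p = some e ∧ p e = true ∧ e ∈ l ∧ d.length ≤ e.length := by
  intro l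
  induction l with
  | nil => intro _ d hd; simp at hd
  | cons a t ih =>
    intro hp d hd hpd
    by_cases ha : p a = true
    · refine ⟨a, by simp [ha], ha, List.mem_cons_self, ?_⟩
      rcases List.mem_cons.mp hd with h | h
      · subst h; exact le_refl _
      · exact (List.pairwise_cons.mp hp).1 d h
    · have hd' : d ∈ t := by
        rcases List.mem_cons.mp hd with h | h
        · subst h; exact absurd hpd ha
        · exact h
      obtain ⟨e, h1, h2, h3, h4⟩ := ih (List.pairwise_cons.mp hp).2 d hd' hpd
      refine ⟨e, ?_, h2, List.mem_cons_of_mem _ h3, h4⟩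
      rw [List.find?_cons_of_neg (by simpa using ha)]
      exact h1

theorem pv_slice_len (seq : List Int) (i L : Nat) :
    (PySem.List.slice seq (some (i:Int)) (some ((i:Int) + (L:Int)))).length = min L (seq.length - i) := by
  rw [PySem.List.slice_natCast_add]
  simp [List.length_take, List.length_drop]

theorem pv_slice_one (seq : List Int) (i : Nat) (h : i < seq.length) :
    PySem.List.slice seq (some (i:Int)) (some ((i:Int) + ((1:Nat):Int))) = [seq[i]] := by
  rw [PySem.List.slice_natCast_add]
  rw [List.drop_eq_getElem_cons h]
  rfl

theorem pv_match (seq : List Int) (dict : PySem.Dict (List Int) String) (maxLen i : Nat)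
    (hi : i < seq.length)
    (Hkeys : ∀ k ∈ dict.keys, k ≠ [] ∧ k.length ≤ maxLen ∧ ∀ x ∈ k, x ∈ seq)
    (Hsing : ∀ s ∈ seq, [s] ∈ dict.keys) :
    (PySem.List.sorted dict.keys (fun d => d.length) true).find?
        (fun d => PySem.List.slice seq (some (i:Int)) (some ((i:Int) + (d.length:Int))) == d) =
      some (PySem.List.slice seq (some (i:Int))
        (some ((i:Int) + ((pvProbe seq dict i (min maxLen (seq.length - i)) : Nat):Int))))
    ∧ PySem.List.slice seq (some (i:Int))
        (some ((i:Int) + ((pvProbe seq dict i (min maxLen (seq.length - i)) : Nat):Int))) ∈ dict.keys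
    ∧ (PySem.List.slice seq (some (i:Int))
        (some ((i:Int) + ((pvProbe seq dict i (min maxLen (seq.length - i)) : Nat):Int)))).length
        = pvProbe seq dict i (min maxLen (seq.length - i))
    ∧ 1 ≤ pvProbe seq dict i (min maxLen (seq.length - i)) := by
  set L := pvProbe seq dict i (min maxLen (seq.length - i)) with hLdef
  set cur := PySem.List.slice seq (some (i:Int)) (some ((i:Int) + (L:Int))) with hcur
  -- the single symbol is always a key
  have hsi : [seq[i]] ∈ dict.keys := Hsing _ (List.getElem_mem hi)
  have hmax1 : 1 ≤ maxLen := by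
    have := (Hkeys _ hsi).2.1
    simpa using this
  have hS : 1 ≤ min maxLen (seq.length - i) := by omega
  obtain ⟨p1, p2, p3, p4⟩ := pvProbe_spec seq dict i _ hS
  rw [← hLdef] at p1 p2 p3 p4
  -- the slice at L is a key
  have hone : dict.contains (PySem.List.slice seq (some (i:Int)) (some ((i:Int) + ((1:Nat):Int)))) = true := by
    rw [pv_slice_one seq i hi]
    exact (PySem.Dict.contains_iff_mem_keys _ _).mpr hsi
  have hcont : dict.contains cur = true := by
    rcases p3 with h | h
    · rw [hcur, h]; exact_mod_cast hone
    · exact h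
  have hmem : cur ∈ dict.keys := (PySem.Dict.contains_iff_mem_keys _ _).mp hcont
  have hLle : L ≤ seq.length - i := le_trans p2 (by omega)
  have hlen : cur.length = L := by
    rw [hcur, pv_slice_len]; omega
  -- any matching key has length ≤ L
  have hbound : ∀ d ∈ dict.keys,
      PySem.List.slice seq (some (i:Int)) (some ((i:Int) + (d.length:Int))) = d → d.length ≤ L := by
    intro d hd hmatch
    have hdle : d.length ≤ seq.length - i := by
      have := congrArg List.length hmatch
      rw [pv_slice_len] at this
      omega
    have hdml : d.length ≤ maxLen := (Hkeys d hd).2.1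
    by_contra hgt
    have hfalse := p4 d.length (by omega) (by omega)
    rw [hmatch] at hfalse
    rw [(PySem.Dict.contains_iff_mem_keys _ _).mpr hd] at hfalse
    exact absurd hfalse (by simp)
  -- cur itself matches
  have hpcur : (PySem.List.slice seq (some (i:Int)) (some ((i:Int) + (cur.length:Int))) == cur) = true := by
    rw [hlen, ← hcur]
    exact beq_self_eq_true _
  refine ⟨?_, hmem, hlen, p1⟩
  obtain ⟨e, h1, h2, h3, h4⟩ := pv_find_first_len
    (fun d => PySem.List.slice seq (some (i:Int)) (some ((i:Int) + (d.length:Int))) == d)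
    (PySem.List.sorted dict.keys (fun d => d.length) true)
    (PySem.List.sorted_pairwise_rev _ _)
    cur ((PySem.List.mem_sorted _ _ _ _).mpr hmem) hpcur
  have he : e ∈ dict.keys := (PySem.List.mem_sorted _ _ _ _).mp h3
  have hematch : PySem.List.slice seq (some (i:Int)) (some ((i:Int) + (e.length:Int))) = e := by
    exact eq_of_beq h2
  have hele : e.length ≤ L := hbound e he hematch
  have helen : e.length = L := by rw [hlen] at h4; omega
  have : e = cur := by rw [← hematch, helen, hcur]
  rw [h1, this]

theorem pv_unique_nodup (xs : List Int) :
    (PySem.List.sorted (PySem.Set.ofList xs) (fun x => x) false).Nodup :=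
  (PySem.List.sorted_perm _ _ _).nodup_iff.mpr (PySem.Set.nodup_ofList _)

theorem pv_unique_mem (xs : List Int) (x : Int) :
    x ∈ PySem.List.sorted (PySem.Set.ofList xs) (fun x => x) false ↔ x ∈ xs := by
  rw [PySem.List.mem_sorted, PySem.Set.mem_ofList]

theorem pv_labelMap_items (xs : List Int) :
    ((PySem.List.sorted (PySem.Set.ofList xs) (fun x => x) false).foldl
        (fun d s => d.insert s ("sigma_" ++ PySem.Int.toStr s)) PySem.Dict.empty).items =
      (PySem.List.sorted (PySem.Set.ofList xs) (fun x => x) false).map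
        (fun s => (s, "sigma_" ++ PySem.Int.toStr s)) := by
  rw [PySem.Dict.items_foldl_insert_fresh _ (fun s => s)
    (fun s => "sigma_" ++ PySem.Int.toStr s) PySem.Dict.empty
    (fun a _ => PySem.Dict.contains_empty _) (by simpa using pv_unique_nodup xs)]
  rfl

theorem pv_dict0_items (xs : List Int) :
    ((PySem.List.sorted (PySem.Set.ofList xs) (fun x => x) false).foldl
        (fun d s => d.insert [s] ("sigma_" ++ PySem.Int.toStr s)) PySem.Dict.empty).items =
      (PySem.List.sorted (PySem.Set.ofList xs) (fun x => x) false).map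
        (fun s => ([s], "sigma_" ++ PySem.Int.toStr s)) := by
  rw [PySem.Dict.items_foldl_insert_fresh _ (fun s => [s])
    (fun s => "sigma_" ++ PySem.Int.toStr s) PySem.Dict.empty
    (fun a _ => PySem.Dict.contains_empty _)
    (List.Nodup.map (fun a b h => by simpa using h) (pv_unique_nodup xs))]
  rfl

theorem pv_labelMap_getD (xs : List Int) (x : Int) (hx : x ∈ xs) :
    ((PySem.List.sorted (PySem.Set.ofList xs) (fun x => x) false).foldl
        (fun d s => d.insert s ("sigma_" ++ PySem.Int.toStr s)) PySem.Dict.empty).getD x "" =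
      "sigma_" ++ PySem.Int.toStr x := by
  apply PySem.Dict.getD_of_mem_items
  · rw [pv_labelMap_items]
    exact List.mem_map.mpr ⟨x, (pv_unique_mem xs x).mpr hx, rfl⟩
  · exact PySem.Dict.nodup_keys_foldl_insert _ _ _ PySem.Dict.nodup_keys_empty

theorem pv_dict0_keys (xs : List Int) (k : List Int) :
    k ∈ ((PySem.List.sorted (PySem.Set.ofList xs) (fun x => x) false).foldl
        (fun d s => d.insert [s] ("sigma_" ++ PySem.Int.toStr s)) PySem.Dict.empty).keys ↔
      ∃ s ∈ xs, k = [s] := by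
  show k ∈ (List.map Prod.fst _) ↔ _
  rw [pv_dict0_items]
  simp only [List.map_map, List.mem_map]
  constructor
  · rintro ⟨s, hs, rfl⟩
    exact ⟨s, (pv_unique_mem xs s).mp hs, rfl⟩
  · rintro ⟨s, hs, rfl⟩
    exact ⟨s, (pv_unique_mem xs s).mpr hs, rfl⟩

theorem pv_fmt_eq (labelMap : PySem.Dict Int String) (t : List Int)
    (h : ∀ x ∈ t, labelMap.getD x "" = "sigma_" ++ PySem.Int.toStr x) (hne : t ≠ []) :
    pvFmtA labelMap t = pvFmtB t := by
  unfold pvFmtA pvFmtB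
  rw [if_neg hne]
  congr 1
  exact List.map_congr_left h

theorem pv_combined (factors : List (List Int)) (cur pf : List Int)
    (hpf : factors.getLast? = some pf) :
    PySem.List.pyGetD (factors ++ [cur]) (((factors.length : Int) + 1) - 2) [] ++
      PySem.List.pyGetD (factors ++ [cur]) (((factors.length : Int) + 1) - 1) [] = pf ++ cur := by
  have hne : factors ≠ [] := by
    intro h; rw [h] at hpf; simp at hpf
  have hl : 1 ≤ factors.length := by
    cases factors with
    | nil => exact absurd rfl hne
    | cons a t => simp
  have e1 : ((factors.length : Int) + 1) - 2 = ((factors.length - 1 : Nat) : Int) := by omega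
  have e2 : ((factors.length : Int) + 1) - 1 = ((factors.length : Nat) : Int) := by omega
  rw [e1, e2, PySem.List.pyGetD_natCast, PySem.List.pyGetD_natCast]
  have hb1 : factors.length - 1 < (factors ++ [cur]).length := by
    simp only [List.length_append, List.length_cons, List.length_nil]; omega
  have hb2 : factors.length < (factors ++ [cur]).length := by
    simp only [List.length_append, List.length_cons, List.length_nil]; omega
  rw [List.getD_eq_getElem _ _ hb1, List.getD_eq_getElem _ _ hb2]
  congr 1
  · rw [List.getElem_append_left (by omega)]
    have : factors.getLast? = factors[factors.length - 1]? := List.getLast?_eq_getElem?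
    rw [hpf] at this
    have h2 := (List.getElem?_eq_some_iff.mp this.symm).2
    exact h2
  · exact List.getElem_concat_length rfl _

theorem pv_loop_eq (seq : List Int) (labelMap : PySem.Dict Int String)
    (Hlab : ∀ x ∈ seq, labelMap.getD x "" = "sigma_" ++ PySem.Int.toStr x) :
    ∀ (fuel i : Nat) (dict : PySem.Dict (List Int) String) (factors : List (List Int))
      (details : List (List (String × String))) (dac : Int) (maxLen : Nat),
      (∀ f ∈ factors, ∀ x ∈ f, x ∈ seq) →
      (∀ k ∈ dict.keys, k ≠ [] ∧ k.length ≤ maxLen ∧ ∀ x ∈ k, x ∈ seq) →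
      (∀ s ∈ seq, [s] ∈ dict.keys) →
      pvALoop seq labelMap fuel i dict factors details (factors.length : Int) dac =
        pvBLoop seq fuel i dict maxLen factors.getLast? details (factors.length : Int) dac := by
  intro fuel
  induction fuel with
  | zero =>
    intro i dict factors details dac maxLen _ _ _
    rfl
  | succ fuel ih =>
    intro i dict factors details dac maxLen Hfac Hkeys Hsing
    by_cases hi : i < seq.length
    · obtain ⟨hfind, hmem, hlen, hL1⟩ := pv_match seq dict maxLen i hi Hkeys Hsing
      have hcne : PySem.List.slice seq (some (i:Int))
          (some ((i:Int) + ((pvProbe seq dict i (min maxLen (seq.length - i)) : Nat):Int))) ≠ [] := by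
        intro h
        rw [h] at hlen
        simp at hlen
        omega
      have hsub : ∀ x ∈ PySem.List.slice seq (some (i:Int))
          (some ((i:Int) + ((pvProbe seq dict i (min maxLen (seq.length - i)) : Nat):Int))), x ∈ seq := by
        intro x hx
        exact PySem.List.mem_of_mem_slice _ _ _ hx
      simp only [pvALoop, pvBLoop, if_pos hi]
      rw [hfind]
      simp only [if_neg hcne]
      set cur : List Int := PySem.List.slice seq (some (i:Int))
        (some ((i:Int) + ((pvProbe seq dict i (min maxLen (seq.length - i)) : Nat):Int))) with hcur
      have hfmt : pvFmtA labelMap cur = pvFmtB cur :=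
        pv_fmt_eq labelMap cur (fun x hx => Hlab x (hsub x hx)) hcne
      have hfcast : ((factors.length : Int) + 1) = (((factors ++ [cur]).length : Nat) : Int) := by
        simp [List.length_append]
      have hglc : (some cur : Option (List Int)) = (factors ++ [cur]).getLast? :=
        (List.getLast?_concat).symm
      have hcurfac : ∀ f ∈ factors ++ [cur], ∀ x ∈ f, x ∈ seq := by
        intro f hf
        rcases List.mem_append.mp hf with h | h
        · exact Hfac f h
        · intro x hx
          rcases List.mem_singleton.mp h with rfl
          exact hsub x hx
      cases hgl : factors.getLast? with
      | none =>
        have h0 : factors.length = 0 := by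
          have : factors = [] := List.getLast?_eq_none_iff.mp hgl
          rw [this]; rfl
        rw [if_neg (show ¬ (2:Int) ≤ (factors.length : Int) + 1 by omega)]
        simp only []
        rw [hfmt, hlen, hfcast, hglc]
        exact ih _ _ _ _ _ _ hcurfac Hkeys Hsing
      | some pf =>
        have hne : factors ≠ [] := by
          intro h; rw [h] at hgl; simp at hgl
        have h1 : 1 ≤ factors.length := List.length_pos_iff.mpr hne
        rw [if_pos (show (2:Int) ≤ (factors.length : Int) + 1 by omega)]
        rw [pv_combined factors cur pf hgl]
        have hpfseq : ∀ x ∈ pf ++ cur, x ∈ seq := by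
          intro x hx
          rcases List.mem_append.mp hx with h | h
          · exact Hfac pf (List.mem_of_getLast? hgl) x h
          · exact hsub x h
        by_cases hcmb : dict.contains (pf ++ cur) = true
        · simp only [if_pos hcmb]
          rw [hfmt, hlen, hfcast, hglc]
          exact ih _ _ _ _ _ _ hcurfac Hkeys Hsing
        · simp only [if_neg hcmb]
          have hfmt2 : pvFmtA labelMap (pf ++ cur) = pvFmtB (pf ++ cur) :=
            pv_fmt_eq labelMap (pf ++ cur) (fun x hx => Hlab x (hpfseq x hx)) (by simp [hcne])
          rw [hfmt, hfmt2, hlen, hfcast, hglc]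
          apply ih
          · exact hcurfac
          · intro k hk
            rcases (PySem.Dict.mem_keys_insert _ _ _ _).mp hk with h | h
            · subst h
              refine ⟨by simp [hcne], le_max_right _ _, hpfseq⟩
            · obtain ⟨a1, a2, a3⟩ := Hkeys k h
              exact ⟨a1, le_trans a2 (le_max_left _ _), a3⟩
          · intro s hs
            exact (PySem.Dict.mem_keys_insert _ _ _ _).mpr (Or.inr (Hsing s hs))
    · simp only [pvALoop, pvBLoop, if_neg hi]

theorem pv_dict0_inv (xs : List Int) :
    ∀ k ∈ ((PySem.List.sorted (PySem.Set.ofList xs) (fun x => x) false).foldl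
        (fun d s => d.insert [s] ("sigma_" ++ PySem.Int.toStr s)) PySem.Dict.empty).keys,
      k ≠ [] ∧ k.length ≤ 1 ∧ ∀ x ∈ k, x ∈ xs := by
  intro k hk
  obtain ⟨s, hs, rfl⟩ := (pv_dict0_keys xs k).mp hk
  refine ⟨by simp, by simp, ?_⟩
  intro x hx
  rcases List.mem_singleton.mp hx with rfl
  exact hs

-- ===== VERDICT (by name: the statement is the Claim_ definition above) =====
theorem lzmw_compress_spec : Claim_equal_lzmw_compress := by
  unfold Claim_equal_lzmw_compress Spec_lzmw_compress
  intro xs _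
  unfold lzmw_compress lzmw_compress_alt
  exact pv_loop_eq xs _ (fun x hx => pv_labelMap_getD xs x hx) xs.length 0 _ [] [] 0 1
    (fun f hf => absurd hf (List.not_mem_nil))
    (pv_dict0_inv xs)
    (fun s hs => (pv_dict0_keys xs [s]).mpr ⟨s, hs, rfl⟩)
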